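-- pv_equiv track=rewrite | github.com/MrBrantCode/unitest_baseline | mut_generate/mist_train_taco/taco_16641/solution.py | can_be_sum_of_two_semi_primes
-- ===== SOURCE A (Python) =====
-- def can_be_sum_of_two_semi_primes(N):
--     n = 201
--     v = [0 for i in range(n + 1)]
--
--     def gen():
--         for i in range(1, n + 1):
--             v[i] = i
--         countDivision = [0 for i in range(n + 1)]
--         for i in range(n + 1):
--             countDivision[i] = 2
--         for i in range(2, n + 1, 1):
--             if v[i] == i and countDivision[i] == 2:
--                 for j in range(2 * i, n + 1, i):
--                     if countDivision[j] > 0: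
--                         v[j] = int(v[j] / i)
--                         countDivision[j] -= 1
--
--     gen()
--     flag = 0
--     for i in range(2, N // 2 + 1):
--         if v[i] == 1 and v[N - i] == 1:
--             flag = 1
--             break
--
--     return "YES" if flag == 1 else "NO"
-- ===== SOURCE B (Python) =====
-- def _is_prime(q):
--     if q < 2:
--         return False
--     d = 2
--     while d * d <= q:
--         if q % d == 0:
--             return False
--         d += 1
--     return True
--
--
-- def _is_semi(m):
--     # product of two DISTINCT primes (squares of primes do not qualify,
--     # matching the divide-out sieve's marking)
--     d = 2
--     while d * d <= m:
--         if m % d == 0: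
--             q = m // d
--             return q != d and _is_prime(q)
--         d += 1
--     return False
--
--
-- def can_be_sum_of_two_semi_primes(N):
--     for i in range(2, N // 2 + 1):
--         if _is_semi(i) and _is_semi(N - i):
--             return "YES"
--     return "NO"
-- ===== Notes on version B (the rewrite author's own statement) =====
-- stated objective: simpler
-- what changed: B drops A's fixed-size divide-out sieve (three array-building passes with a nested marking loop) and instead tests each candidate i and N-i directly by trial division: i is accepted iff its smallest divisor d gives a cofactor i//d that is a prime different from d (A's sieve marks exactly the products of two distinct primes).
-- crash fix: For N >= 208 A raises IndexError (the scan reaches the smallest index its table marks and reads v[N-i] beyond the table's last index); B returns the genuine YES/NO answer there. — e.g. on can_be_sum_of_two_semi_primes(208): A raises IndexError, B returns "YES"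
import Mathlib
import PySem

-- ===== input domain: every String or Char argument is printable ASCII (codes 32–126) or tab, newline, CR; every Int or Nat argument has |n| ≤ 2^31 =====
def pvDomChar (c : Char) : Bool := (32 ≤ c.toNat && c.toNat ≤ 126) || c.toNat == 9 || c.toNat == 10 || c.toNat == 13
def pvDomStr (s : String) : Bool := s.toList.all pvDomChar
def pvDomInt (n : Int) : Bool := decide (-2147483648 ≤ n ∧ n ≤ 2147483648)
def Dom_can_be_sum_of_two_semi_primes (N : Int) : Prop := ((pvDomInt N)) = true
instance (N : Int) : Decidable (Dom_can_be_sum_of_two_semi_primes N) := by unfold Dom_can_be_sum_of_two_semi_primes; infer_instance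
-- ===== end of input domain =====

-- B replaces A's divide-out sieve table with a direct trial-division test of
-- "product of two distinct primes" applied to i and N - i (objective: simpler).

-- ===== PORT A =====
-- gen(): the divide-out sieve over v/countDivision; indices are always in range, so the
-- total forms pyGetD/pySetD are exact.  int(v[j]/i) is ported as floordiv: the operands
-- are positive (floor = truncation) and the float quotient of ints ≤ 201 is exact.
def pvV0build : List Int := (PySem.List.pyRange 0 (201 + 1) 1).map (fun _ => (0 : Int))

-- for i in range(1, n+1): v[i] = i
def pvV1build : List Int :=
  (PySem.List.pyRange 1 (201 + 1) 1).foldl (fun v i => PySem.List.pySetD v i i) pvV0build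

def pvCd0build : List Int := (PySem.List.pyRange 0 (201 + 1) 1).map (fun _ => (0 : Int))

-- for i in range(n+1): countDivision[i] = 2
def pvCd1build : List Int :=
  (PySem.List.pyRange 0 (201 + 1) 1).foldl (fun cd i => PySem.List.pySetD cd i (2 : Int)) pvCd0build

-- body of the outer sieve loop (state = (v, countDivision))
def pvOuter (st : List Int × List Int) (i : Int) : List Int × List Int :=
  if PySem.List.pyGetD st.1 i 0 == i && PySem.List.pyGetD st.2 i 0 == 2 then
    (PySem.List.pyRange (2 * i) (201 + 1) i).foldl
      (fun (st2 : List Int × List Int) j =>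
        if PySem.List.pyGetD st2.2 j 0 > 0 then
          (PySem.List.pySetD st2.1 j
             (PySem.Int.floordiv (PySem.List.pyGetD st2.1 j 0) i),
           PySem.List.pySetD st2.2 j (PySem.List.pyGetD st2.2 j 0 - 1))
        else st2) st
  else st

def pvGen : List Int :=
  ((PySem.List.pyRange 2 (201 + 1) 1).foldl pvOuter (pvV1build, pvCd1build)).1

-- the scanning loop with flag/break; the second lookup is reached only when the first
-- equals 1 (Python's short-circuit), which && reproduces value-wise
def pvAloop (v : List Int) (N : Int) : List Int → Bool
  | [] => false
  | i :: rest =>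
    if PySem.List.pyGetD v i 0 == 1 && PySem.List.pyGetD v (N - i) 0 == 1 then true
    else pvAloop v N rest

def can_be_sum_of_two_semi_primes (N : Int) : String :=
  let v := pvGen
  if pvAloop v N (PySem.List.pyRange 2 (PySem.Int.floordiv N 2 + 1) 1) then "YES" else "NO"

-- ===== PORT B =====
-- _is_prime: trial division; fuel q.toNat bounds the number of d increments
def pvIsPrimeLoop (q d : Int) (fuel : Nat) : Bool :=
  match fuel with
  | 0 => true
  | f + 1 =>
    if d * d ≤ q then
      if PySem.Int.mod q d == 0 then false else pvIsPrimeLoop q (d + 1) f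
    else true

def pvIsPrime (q : Int) : Bool :=
  if q < 2 then false else pvIsPrimeLoop q 2 q.toNat

-- _is_semi: smallest divisor d, then m//d must be a prime different from d
def pvIsSemiLoop (m d : Int) (fuel : Nat) : Bool :=
  match fuel with
  | 0 => false
  | f + 1 =>
    if d * d ≤ m then
      if PySem.Int.mod m d == 0 then
        PySem.Int.floordiv m d != d && pvIsPrime (PySem.Int.floordiv m d)
      else pvIsSemiLoop m (d + 1) f
    else false

def pvIsSemi (m : Int) : Bool := pvIsSemiLoop m 2 m.toNat

def pvBloop (N : Int) : List Int → String
  | [] => "NO"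
  | i :: rest =>
    if pvIsSemi i && pvIsSemi (N - i) then "YES" else pvBloop N rest

def can_be_sum_of_two_semi_primes_alt (N : Int) : String :=
  pvBloop N (PySem.List.pyRange 2 (PySem.Int.floordiv N 2 + 1) 1)

-- ===== PRECONDITION & SPEC =====
-- Pre_ excludes exactly the inputs on which A raises IndexError: for N ≥ 208 the scan
-- reaches the smallest table-marked index i and evaluates v[N - i] with N - i > 201.
def Pre_can_be_sum_of_two_semi_primes (N : Int) : Prop := N ≤ 207
instance (N : Int) : Decidable (Pre_can_be_sum_of_two_semi_primes N) := by
  unfold Pre_can_be_sum_of_two_semi_primes; infer_instance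

def pvWitness_can_be_sum_of_two_semi_primes : Int := 10

-- For N ≥ 208 A raises IndexError (reading past its fixed-size table); B returns the genuine YES/NO answer there.
def Raises_can_be_sum_of_two_semi_primes (N : Int) : Prop := 208 ≤ N
instance (N : Int) : Decidable (Raises_can_be_sum_of_two_semi_primes N) := by
  unfold Raises_can_be_sum_of_two_semi_primes; infer_instance
def pvRaiseWitness_can_be_sum_of_two_semi_primes : Int := 208
def pvRaiseWitnessOut_can_be_sum_of_two_semi_primes : String := "YES"

def Spec_can_be_sum_of_two_semi_primes (N : Int) (out : String) : Prop := out = can_be_sum_of_two_semi_primes_alt N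
instance (N : Int) (out : String) : Decidable (Spec_can_be_sum_of_two_semi_primes N out) := by unfold Spec_can_be_sum_of_two_semi_primes; infer_instance

-- ===== CLAIM (what is proved, stated in full; the proofs are below) =====
def Claim_equal_can_be_sum_of_two_semi_primes : Prop := ∀ (N : Int), Dom_can_be_sum_of_two_semi_primes N → Pre_can_be_sum_of_two_semi_primes N → Spec_can_be_sum_of_two_semi_primes N (can_be_sum_of_two_semi_primes N)

def Claim_raises_can_be_sum_of_two_semi_primes : Prop := (∀ (N : Int), Dom_can_be_sum_of_two_semi_primes N → Raises_can_be_sum_of_two_semi_primes N → ¬ Pre_can_be_sum_of_two_semi_primes N) ∧ (Dom_can_be_sum_of_two_semi_primes (pvRaiseWitness_can_be_sum_of_two_semi_primes) ∧ Raises_can_be_sum_of_two_semi_primes (pvRaiseWitness_can_be_sum_of_two_semi_primes) ∧ can_be_sum_of_two_semi_primes_alt (pvRaiseWitness_can_be_sum_of_two_semi_primes) = pvRaiseWitnessOut_can_be_sum_of_two_semi_primes)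

-- ===== LEMMAS AND PROOFS =====

-- the sieve table, computed once (pvSt9.1); the fold is evaluated in chunks of 20
-- outer iterations, each chunk certified by decide from the previous literal state
def pvV1 : List Int := [0, 1, 2, 3, 4, 5, 6, 7, 8, 9, 10, 11, 12, 13, 14, 15, 16, 17, 18, 19, 20, 21, 22, 23, 24, 25, 26, 27, 28, 29, 30, 31, 32, 33, 34, 35, 36, 37, 38, 39, 40, 41, 42, 43, 44, 45, 46, 47, 48, 49, 50, 51, 52, 53, 54, 55, 56, 57, 58, 59, 60, 61, 62, 63, 64, 65, 66, 67, 68, 69, 70, 71, 72, 73, 74, 75, 76, 77, 78, 79, 80, 81, 82, 83, 84, 85, 86, 87, 88, 89, 90, 91, 92, 93, 94, 95, 96, 97, 98, 99, 100, 101, 102, 103, 104, 105, 106, 107, 108, 109, 110, 111, 112, 113, 114, 115, 116, 117, 118, 119, 120, 121, 122, 123, 124, 125, 126, 127, 128, 129, 130, 131, 132, 133, 134, 135, 136, 137, 138, 139, 140, 141, 142, 143, 144, 145, 146, 147, 148, 149, 150, 151, 152, 153, 154, 155, 156, 157, 158, 159, 160, 161, 162, 163, 164, 165, 166, 167, 168,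 169, 170, 171, 172, 173, 174, 175, 176, 177, 178, 179, 180, 181, 182, 183, 184, 185, 186, 187, 188, 189, 190, 191, 192, 193, 194, 195, 196, 197, 198, 199, 200, 201]

def pvCd1 : List Int := [2, 2, 2, 2, 2, 2, 2, 2, 2, 2, 2, 2, 2, 2, 2, 2, 2, 2, 2, 2, 2, 2, 2, 2, 2, 2, 2, 2, 2, 2, 2, 2, 2, 2, 2, 2, 2, 2, 2, 2, 2, 2, 2, 2, 2, 2, 2, 2, 2, 2, 2, 2, 2, 2, 2, 2, 2, 2, 2, 2, 2, 2, 2, 2, 2, 2, 2, 2, 2, 2, 2, 2, 2, 2, 2, 2, 2, 2, 2, 2, 2, 2, 2, 2, 2, 2, 2, 2, 2, 2, 2, 2, 2, 2, 2, 2, 2, 2, 2, 2, 2, 2, 2, 2, 2, 2, 2, 2, 2, 2, 2, 2, 2, 2, 2, 2, 2, 2, 2, 2, 2, 2, 2, 2, 2, 2, 2, 2, 2, 2, 2, 2, 2, 2, 2, 2, 2, 2, 2, 2, 2, 2, 2, 2, 2, 2, 2, 2, 2, 2, 2, 2, 2, 2, 2, 2, 2, 2, 2, 2, 2, 2, 2,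 2, 2, 2, 2, 2, 2, 2, 2, 2, 2, 2, 2, 2, 2, 2, 2, 2, 2, 2, 2, 2, 2, 2, 2, 2, 2, 2, 2, 2, 2, 2, 2, 2, 2, 2, 2, 2, 2, 2]

def pvSt0 : List Int × List Int := ([0, 1, 2, 3, 2, 5, 1, 7, 4, 3, 1, 11, 2, 13, 1, 1, 8, 17, 3, 19, 2, 1, 1, 23, 4, 5, 1, 9, 2, 29, 5, 31, 16, 1, 1, 1, 6, 37, 1, 1, 4, 41, 7, 43, 2, 3, 23, 47, 8, 7, 5, 1, 2, 53, 9, 1, 4, 1, 29, 59, 10, 61, 31, 3, 32, 1, 11, 67, 2, 23, 7, 71, 12, 73, 37, 5, 2, 1, 13, 79, 8, 27, 41, 83, 14, 1, 43, 29, 4, 89, 15, 1, 46, 31, 47, 1, 16, 97, 7, 3, 10, 101, 17, 103, 4, 7, 53, 107, 18, 109, 11, 37, 8, 113, 19, 23, 58, 3, 59, 1, 20, 11, 61, 41, 62, 25, 21, 127, 64, 43, 13, 131, 22, 1, 67, 9, 4, 137, 23, 139, 14, 47, 71, 1, 24, 29, 73, 7, 74, 149, 25, 151, 4, 3, 11,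 31, 26, 157, 79, 53, 16, 23, 27, 163, 82, 11, 83, 167, 28, 13, 17, 3, 86, 173, 29, 5, 8, 59, 89, 179, 30, 181, 13, 61, 92, 37, 31, 1, 94, 9, 19, 191, 32, 193, 97, 13, 14, 197, 33, 199, 20, 67], [2, 2, 2, 2, 1, 2, 0, 2, 1, 1, 0, 2, 0, 2, 0, 0, 1, 2, 0, 2, 0, 0, 0, 2, 0, 1, 0, 1, 0, 2, 0, 2, 1, 0, 0, 0, 0, 2, 0, 0, 0, 2, 0, 2, 0, 0, 1, 2, 0, 1, 0, 0, 0, 2, 0, 0, 0, 0, 1, 2, 0, 2, 1, 0, 1, 0, 0, 2, 0, 1, 0, 2, 0, 2, 1, 0, 0, 0, 0, 2, 0, 1, 1, 2, 0, 0, 1, 1, 0, 2, 0, 0, 1, 1, 1, 0, 0, 2, 0, 0, 0, 2, 0, 2, 0, 0, 1, 2, 0, 2, 0, 1, 0, 2, 0, 1, 1, 0, 1, 0, 0, 1, 1, 1, 1, 1, 0, 2, 1, 1, 0, 2, 0, 0, 1, 0, 0, 2, 0, 2, 0, 1, 1, 0, 0, 1, 1, 0, 1, 2, 0, 2, 0,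 0, 0, 1, 0, 2, 1, 1, 0, 1, 0, 2, 1, 0, 1, 2, 0, 1, 0, 0, 1, 2, 0, 0, 0, 1, 1, 2, 0, 2, 0, 1, 1, 1, 0, 0, 1, 0, 0, 2, 0, 2, 1, 0, 0, 2, 0, 2, 0, 1])

def pvSt1 : List Int × List Int := ([0, 1, 2, 3, 2, 5, 1, 7, 4, 3, 1, 11, 2, 13, 1, 1, 8, 17, 3, 19, 2, 1, 1, 23, 4, 5, 1, 9, 2, 29, 5, 31, 16, 1, 1, 1, 6, 37, 1, 1, 4, 41, 7, 43, 2, 3, 1, 47, 8, 7, 5, 1, 2, 53, 9, 1, 4, 1, 1, 59, 10, 61, 1, 3, 32, 1, 11, 67, 2, 1, 7, 71, 12, 73, 1, 5, 2, 1, 13, 79, 8, 27, 1, 83, 14, 1, 43, 1, 4, 89, 15, 1, 2, 1, 47, 1, 16, 97, 7, 3, 10, 101, 17, 103, 4, 7, 53, 107, 18, 109, 11, 1, 8, 113, 19, 1, 2, 3, 59, 1, 20, 11, 61, 1, 2, 25, 21, 127, 64, 43, 13, 131, 22, 1, 67, 9, 4, 137, 23, 139, 14, 47, 71, 1, 24,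 1, 73, 7, 2, 149, 25, 151, 4, 3, 11, 1, 26, 157, 79, 53, 16, 1, 27, 163, 2, 11, 83, 167, 28, 13, 17, 3, 86, 173, 29, 5, 8, 59, 89, 179, 30, 181, 13, 61, 4, 1, 31, 1, 94, 9, 19, 191, 32, 193, 97, 13, 14, 197, 33, 199, 20, 67], [2, 2, 2, 2, 1, 2, 0, 2, 1, 1, 0, 2, 0, 2, 0, 0, 1, 2, 0, 2, 0, 0, 0, 2, 0, 1, 0, 1, 0, 2, 0, 2, 1, 0, 0, 0, 0, 2, 0, 0, 0, 2, 0, 2, 0, 0, 0, 2, 0, 1, 0, 0, 0, 2, 0, 0, 0, 0, 0, 2, 0, 2, 0, 0, 1, 0, 0, 2, 0, 0, 0, 2, 0, 2, 0, 0, 0, 0, 0, 2, 0, 1, 0, 2, 0, 0, 1, 0, 0, 2, 0, 0, 0, 0, 1, 0, 0, 2, 0, 0, 0, 2, 0, 2, 0, 0, 1, 2, 0, 2, 0, 0, 0, 2, 0, 0, 0, 0, 1, 0, 0, 1, 1, 0, 0, 1, 0, 2, 1, 1, 0, 2, 0, 0, 1, 0, 0, 2, 0, 2, 0, 1, 1,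 0, 0, 0, 1, 0, 0, 2, 0, 2, 0, 0, 0, 0, 0, 2, 1, 1, 0, 0, 0, 2, 0, 0, 1, 2, 0, 1, 0, 0, 1, 2, 0, 0, 0, 1, 1, 2, 0, 2, 0, 1, 0, 0, 0, 0, 1, 0, 0, 2, 0, 2, 1, 0, 0, 2, 0, 2, 0, 1])

def pvSt2 : List Int × List Int := ([0, 1, 2, 3, 2, 5, 1, 7, 4, 3, 1, 11, 2, 13, 1, 1, 8, 17, 3, 19, 2, 1, 1, 23, 4, 5, 1, 9, 2, 29, 5, 31, 16, 1, 1, 1, 6, 37, 1, 1, 4, 41, 7, 43, 2, 3, 1, 47, 8, 7, 5, 1, 2, 53, 9, 1, 4, 1, 1, 59, 10, 61, 1, 3, 32, 1, 11, 67, 2, 1, 7, 71, 12, 73, 1, 5, 2, 1, 13, 79, 8, 27, 1, 83, 14, 1, 1, 1, 4, 89, 15, 1, 2, 1, 1, 1, 16, 97, 7, 3, 10, 101, 17, 103, 4, 7, 1, 107, 18, 109, 11, 1, 8, 113, 19, 1, 2, 3, 1, 1, 20, 11, 1, 1, 2, 25, 21, 127, 64, 1, 13, 131, 22, 1, 67,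 9, 4, 137, 23, 139, 14, 1, 71, 1, 24, 1, 73, 7, 2, 149, 25, 151, 4, 3, 11, 1, 26, 157, 79, 1, 16, 1, 27, 163, 2, 11, 83, 167, 28, 13, 17, 3, 2, 173, 29, 5, 8, 1, 89, 179, 30, 181, 13, 1, 4, 1, 31, 1, 2, 9, 19, 191, 32, 193, 97, 13, 14, 197, 33, 199, 20, 67], [2, 2, 2, 2, 1, 2, 0, 2, 1, 1, 0, 2, 0, 2, 0, 0, 1, 2, 0, 2, 0, 0, 0, 2, 0, 1, 0, 1, 0, 2, 0, 2, 1, 0, 0, 0, 0, 2, 0, 0, 0, 2, 0, 2, 0, 0, 0, 2, 0, 1, 0, 0, 0, 2, 0, 0, 0, 0, 0, 2, 0, 2, 0, 0, 1, 0, 0, 2, 0, 0, 0, 2, 0, 2, 0, 0, 0, 0, 0, 2, 0, 1, 0, 2, 0, 0, 0, 0, 0, 2, 0, 0, 0, 0, 0, 0, 0, 2, 0, 0, 0, 2, 0, 2, 0, 0, 0, 2, 0, 2, 0, 0, 0, 2, 0, 0, 0, 0, 0, 0, 0, 1, 0, 0, 0, 1, 0, 2, 1, 0, 0, 2, 0,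 0, 1, 0, 0, 2, 0, 2, 0, 0, 1, 0, 0, 0, 1, 0, 0, 2, 0, 2, 0, 0, 0, 0, 0, 2, 1, 0, 0, 0, 0, 2, 0, 0, 1, 2, 0, 1, 0, 0, 0, 2, 0, 0, 0, 0, 1, 2, 0, 2, 0, 0, 0, 0, 0, 0, 0, 0, 0, 2, 0, 2, 1, 0, 0, 2, 0, 2, 0, 1])

def pvSt3 : List Int × List Int := ([0, 1, 2, 3, 2, 5, 1, 7, 4, 3, 1, 11, 2, 13, 1, 1, 8, 17, 3, 19, 2, 1, 1, 23, 4, 5, 1, 9, 2, 29, 5, 31, 16, 1, 1, 1, 6, 37, 1, 1, 4, 41, 7, 43, 2, 3, 1, 47, 8, 7, 5, 1, 2, 53, 9, 1, 4, 1, 1, 59, 10, 61, 1, 3, 32, 1, 11, 67, 2, 1, 7, 71, 12, 73, 1, 5, 2, 1, 13, 79, 8, 27, 1, 83, 14, 1, 1, 1, 4, 89, 15, 1, 2, 1, 1, 1, 16, 97, 7, 3, 10, 101, 17, 103, 4, 7, 1, 107, 18, 109, 11, 1, 8, 113, 19, 1, 2, 3, 1, 1, 20, 11, 1, 1, 2,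 25, 21, 127, 64, 1, 13, 131, 22, 1, 1, 9, 4, 137, 23, 139, 14, 1, 1, 1, 24, 1, 1, 7, 2, 149, 25, 151, 4, 3, 11, 1, 26, 157, 1, 1, 16, 1, 27, 163, 2, 11, 83, 167, 28, 13, 17, 3, 2, 173, 29, 5, 8, 1, 89, 179, 30, 181, 13, 1, 4, 1, 31, 1, 2, 9, 19, 191, 32, 193, 97, 13, 14, 197, 33, 199, 20, 1], [2, 2, 2, 2, 1, 2, 0, 2, 1, 1, 0, 2, 0, 2, 0, 0, 1, 2, 0, 2, 0, 0, 0, 2, 0, 1, 0, 1, 0, 2, 0, 2, 1, 0, 0, 0, 0, 2, 0, 0, 0, 2, 0, 2, 0, 0, 0, 2, 0, 1, 0, 0, 0, 2, 0, 0, 0, 0, 0, 2, 0, 2, 0, 0, 1, 0, 0, 2, 0, 0, 0, 2, 0, 2, 0, 0, 0, 0, 0, 2, 0, 1, 0, 2, 0, 0, 0, 0, 0, 2, 0, 0, 0, 0, 0, 0, 0, 2, 0, 0, 0, 2, 0, 2, 0, 0, 0, 2, 0, 2, 0, 0, 0, 2, 0, 0, 0, 0, 0, 0, 0, 1, 0,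 0, 0, 1, 0, 2, 1, 0, 0, 2, 0, 0, 0, 0, 0, 2, 0, 2, 0, 0, 0, 0, 0, 0, 0, 0, 0, 2, 0, 2, 0, 0, 0, 0, 0, 2, 0, 0, 0, 0, 0, 2, 0, 0, 1, 2, 0, 1, 0, 0, 0, 2, 0, 0, 0, 0, 1, 2, 0, 2, 0, 0, 0, 0, 0, 0, 0, 0, 0, 2, 0, 2, 1, 0, 0, 2, 0, 2, 0, 0])

def pvSt4 : List Int × List Int := ([0, 1, 2, 3, 2, 5, 1, 7, 4, 3, 1, 11, 2, 13, 1, 1, 8, 17, 3, 19, 2, 1, 1, 23, 4, 5, 1, 9, 2, 29, 5, 31, 16, 1, 1, 1, 6, 37, 1, 1, 4, 41, 7, 43, 2, 3, 1, 47, 8, 7, 5, 1, 2, 53, 9, 1, 4, 1, 1, 59, 10, 61, 1, 3, 32, 1, 11, 67, 2, 1, 7, 71, 12, 73, 1, 5, 2, 1, 13, 79, 8, 27, 1, 83, 14, 1, 1, 1, 4, 89, 15, 1, 2, 1, 1, 1, 16, 97, 7, 3, 10, 101, 17, 103, 4, 7, 1, 107, 18, 109, 11, 1, 8, 113, 19,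 1, 2, 3, 1, 1, 20, 11, 1, 1, 2, 25, 21, 127, 64, 1, 13, 131, 22, 1, 1, 9, 4, 137, 23, 139, 14, 1, 1, 1, 24, 1, 1, 7, 2, 149, 25, 151, 4, 3, 11, 1, 26, 157, 1, 1, 16, 1, 27, 163, 2, 11, 1, 167, 28, 13, 17, 3, 2, 173, 29, 5, 8, 1, 1, 179, 30, 181, 13, 1, 4, 1, 31, 1, 2, 9, 19, 191, 32, 193, 1, 13, 14, 197, 33, 199, 20, 1], [2, 2, 2, 2, 1, 2, 0, 2, 1, 1, 0, 2, 0, 2, 0, 0, 1, 2, 0, 2, 0, 0, 0, 2, 0, 1, 0, 1, 0, 2, 0, 2, 1, 0, 0, 0, 0, 2, 0, 0, 0, 2, 0, 2, 0, 0, 0, 2, 0, 1, 0, 0, 0, 2, 0, 0, 0, 0, 0, 2, 0, 2, 0, 0, 1, 0, 0, 2, 0, 0, 0, 2, 0, 2, 0, 0, 0, 0, 0, 2, 0, 1, 0, 2, 0, 0, 0, 0, 0, 2, 0, 0, 0, 0, 0, 0, 0, 2, 0, 0, 0, 2, 0, 2, 0, 0, 0, 2, 0, 2, 0, 0, 0,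 2, 0, 0, 0, 0, 0, 0, 0, 1, 0, 0, 0, 1, 0, 2, 1, 0, 0, 2, 0, 0, 0, 0, 0, 2, 0, 2, 0, 0, 0, 0, 0, 0, 0, 0, 0, 2, 0, 2, 0, 0, 0, 0, 0, 2, 0, 0, 0, 0, 0, 2, 0, 0, 0, 2, 0, 1, 0, 0, 0, 2, 0, 0, 0, 0, 0, 2, 0, 2, 0, 0, 0, 0, 0, 0, 0, 0, 0, 2, 0, 2, 0, 0, 0, 2, 0, 2, 0, 0])

def pvSt5 : List Int × List Int := ([0, 1, 2, 3, 2, 5, 1, 7, 4, 3, 1, 11, 2, 13, 1, 1, 8, 17, 3, 19, 2, 1, 1, 23, 4, 5, 1, 9, 2, 29, 5, 31, 16, 1, 1, 1, 6, 37, 1, 1, 4, 41, 7, 43, 2, 3, 1, 47, 8, 7, 5, 1, 2, 53, 9, 1, 4, 1, 1, 59, 10, 61, 1, 3, 32, 1, 11, 67, 2, 1, 7, 71, 12, 73, 1, 5, 2, 1, 13, 79, 8, 27, 1, 83, 14, 1, 1, 1, 4, 89, 15, 1, 2, 1, 1, 1, 16, 97, 7, 3, 10, 101, 17, 103, 4,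 7, 1, 107, 18, 109, 11, 1, 8, 113, 19, 1, 2, 3, 1, 1, 20, 11, 1, 1, 2, 25, 21, 127, 64, 1, 13, 131, 22, 1, 1, 9, 4, 137, 23, 139, 14, 1, 1, 1, 24, 1, 1, 7, 2, 149, 25, 151, 4, 3, 11, 1, 26, 157, 1, 1, 16, 1, 27, 163, 2, 11, 1, 167, 28, 13, 17, 3, 2, 173, 29, 5, 8, 1, 1, 179, 30, 181, 13, 1, 4, 1, 31, 1, 2, 9, 19, 191, 32, 193, 1, 13, 14, 197, 33, 199, 20, 1], [2, 2, 2, 2, 1, 2, 0, 2, 1, 1, 0, 2, 0, 2, 0, 0, 1, 2, 0, 2, 0, 0, 0, 2, 0, 1, 0, 1, 0, 2, 0, 2, 1, 0, 0, 0, 0, 2, 0, 0, 0, 2, 0, 2, 0, 0, 0, 2, 0, 1, 0, 0, 0, 2, 0, 0, 0, 0, 0, 2, 0, 2, 0, 0, 1, 0, 0, 2, 0, 0, 0, 2, 0, 2, 0, 0, 0, 0, 0, 2, 0, 1, 0, 2, 0, 0, 0, 0, 0, 2, 0, 0, 0, 0, 0, 0, 0, 2, 0, 0, 0, 2, 0,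 2, 0, 0, 0, 2, 0, 2, 0, 0, 0, 2, 0, 0, 0, 0, 0, 0, 0, 1, 0, 0, 0, 1, 0, 2, 1, 0, 0, 2, 0, 0, 0, 0, 0, 2, 0, 2, 0, 0, 0, 0, 0, 0, 0, 0, 0, 2, 0, 2, 0, 0, 0, 0, 0, 2, 0, 0, 0, 0, 0, 2, 0, 0, 0, 2, 0, 1, 0, 0, 0, 2, 0, 0, 0, 0, 0, 2, 0, 2, 0, 0, 0, 0, 0, 0, 0, 0, 0, 2, 0, 2, 0, 0, 0, 2, 0, 2, 0, 0])

def pvSt6 : List Int × List Int := ([0, 1, 2, 3, 2, 5, 1, 7, 4, 3, 1, 11, 2, 13, 1, 1, 8, 17, 3, 19, 2, 1, 1, 23, 4, 5, 1, 9, 2, 29, 5, 31, 16, 1, 1, 1, 6, 37, 1, 1, 4, 41, 7, 43, 2, 3, 1, 47, 8, 7, 5, 1, 2, 53, 9, 1, 4, 1, 1, 59, 10, 61, 1, 3, 32, 1, 11, 67, 2, 1, 7, 71, 12, 73, 1, 5, 2, 1, 13, 79, 8, 27, 1, 83, 14, 1, 1, 1, 4, 89, 15, 1, 2, 1, 1,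 1, 16, 97, 7, 3, 10, 101, 17, 103, 4, 7, 1, 107, 18, 109, 11, 1, 8, 113, 19, 1, 2, 3, 1, 1, 20, 11, 1, 1, 2, 25, 21, 127, 64, 1, 13, 131, 22, 1, 1, 9, 4, 137, 23, 139, 14, 1, 1, 1, 24, 1, 1, 7, 2, 149, 25, 151, 4, 3, 11, 1, 26, 157, 1, 1, 16, 1, 27, 163, 2, 11, 1, 167, 28, 13, 17, 3, 2, 173, 29, 5, 8, 1, 1, 179, 30, 181, 13, 1, 4, 1, 31, 1, 2, 9, 19, 191, 32, 193, 1, 13, 14, 197, 33, 199, 20, 1], [2, 2, 2, 2, 1, 2, 0, 2, 1, 1, 0, 2, 0, 2, 0, 0, 1, 2, 0, 2, 0, 0, 0, 2, 0, 1, 0, 1, 0, 2, 0, 2, 1, 0, 0, 0, 0, 2, 0, 0, 0, 2, 0, 2, 0, 0, 0, 2, 0, 1, 0, 0, 0, 2, 0, 0, 0, 0, 0, 2, 0, 2, 0, 0, 1, 0, 0, 2, 0, 0, 0, 2, 0, 2, 0, 0, 0, 0, 0, 2, 0, 1, 0, 2, 0, 0, 0, 0, 0, 2, 0, 0, 0,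 0, 0, 0, 0, 2, 0, 0, 0, 2, 0, 2, 0, 0, 0, 2, 0, 2, 0, 0, 0, 2, 0, 0, 0, 0, 0, 0, 0, 1, 0, 0, 0, 1, 0, 2, 1, 0, 0, 2, 0, 0, 0, 0, 0, 2, 0, 2, 0, 0, 0, 0, 0, 0, 0, 0, 0, 2, 0, 2, 0, 0, 0, 0, 0, 2, 0, 0, 0, 0, 0, 2, 0, 0, 0, 2, 0, 1, 0, 0, 0, 2, 0, 0, 0, 0, 0, 2, 0, 2, 0, 0, 0, 0, 0, 0, 0, 0, 0, 2, 0, 2, 0, 0, 0, 2, 0, 2, 0, 0])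

def pvSt7 : List Int × List Int := ([0, 1, 2, 3, 2, 5, 1, 7, 4, 3, 1, 11, 2, 13, 1, 1, 8, 17, 3, 19, 2, 1, 1, 23, 4, 5, 1, 9, 2, 29, 5, 31, 16, 1, 1, 1, 6, 37, 1, 1, 4, 41, 7, 43, 2, 3, 1, 47, 8, 7, 5, 1, 2, 53, 9, 1, 4, 1, 1, 59, 10, 61, 1, 3, 32, 1, 11, 67, 2, 1, 7, 71, 12, 73, 1, 5, 2, 1, 13, 79, 8, 27, 1, 83, 14, 1, 1, 1, 4, 89, 15, 1, 2, 1, 1, 1, 16, 97, 7, 3, 10, 101, 17, 103, 4, 7, 1, 107, 18, 109, 11, 1, 8, 113, 19, 1, 2, 3, 1, 1, 20, 11, 1, 1, 2, 25, 21, 127, 64, 1, 13, 131, 22, 1, 1, 9, 4, 137, 23, 139, 14, 1, 1, 1, 24, 1, 1, 7, 2, 149, 25, 151, 4, 3, 11, 1, 26, 157, 1, 1, 16, 1, 27, 163, 2, 11, 1, 167, 28, 13, 17, 3, 2, 173, 29, 5, 8, 1, 1, 179, 30, 181, 13, 1, 4, 1, 31, 1, 2, 9, 19, 191, 32, 193,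 1, 13, 14, 197, 33, 199, 20, 1], [2, 2, 2, 2, 1, 2, 0, 2, 1, 1, 0, 2, 0, 2, 0, 0, 1, 2, 0, 2, 0, 0, 0, 2, 0, 1, 0, 1, 0, 2, 0, 2, 1, 0, 0, 0, 0, 2, 0, 0, 0, 2, 0, 2, 0, 0, 0, 2, 0, 1, 0, 0, 0, 2, 0, 0, 0, 0, 0, 2, 0, 2, 0, 0, 1, 0, 0, 2, 0, 0, 0, 2, 0, 2, 0, 0, 0, 0, 0, 2, 0, 1, 0, 2, 0, 0, 0, 0, 0, 2, 0, 0, 0, 0, 0, 0, 0, 2, 0, 0, 0, 2, 0, 2, 0, 0, 0, 2, 0, 2, 0, 0, 0, 2, 0, 0, 0, 0, 0, 0, 0, 1, 0, 0, 0, 1, 0, 2, 1, 0, 0, 2, 0, 0, 0, 0, 0, 2, 0, 2, 0, 0, 0, 0, 0, 0, 0, 0, 0, 2, 0, 2, 0, 0, 0, 0, 0, 2, 0, 0, 0, 0, 0, 2, 0, 0, 0, 2, 0, 1, 0, 0, 0, 2, 0, 0, 0, 0, 0, 2, 0, 2, 0, 0, 0, 0, 0, 0, 0, 0, 0, 2,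 0, 2, 0, 0, 0, 2, 0, 2, 0, 0])

def pvSt8 : List Int × List Int := ([0, 1, 2, 3, 2, 5, 1, 7, 4, 3, 1, 11, 2, 13, 1, 1, 8, 17, 3, 19, 2, 1, 1, 23, 4, 5, 1, 9, 2, 29, 5, 31, 16, 1, 1, 1, 6, 37, 1, 1, 4, 41, 7, 43, 2, 3, 1, 47, 8, 7, 5, 1, 2, 53, 9, 1, 4, 1, 1, 59, 10, 61, 1, 3, 32, 1, 11, 67, 2, 1, 7, 71, 12, 73, 1, 5, 2, 1, 13, 79, 8, 27, 1, 83, 14, 1, 1, 1, 4, 89, 15, 1, 2, 1, 1, 1, 16, 97, 7, 3, 10, 101, 17, 103, 4, 7, 1, 107, 18, 109, 11, 1, 8, 113, 19, 1, 2, 3, 1, 1, 20, 11, 1, 1, 2, 25, 21, 127, 64, 1, 13, 131, 22, 1, 1, 9, 4, 137, 23, 139, 14, 1, 1, 1, 24, 1, 1, 7, 2, 149, 25, 151, 4, 3, 11, 1, 26, 157, 1, 1, 16, 1, 27, 163, 2, 11, 1, 167, 28, 13, 17, 3, 2, 173, 29, 5, 8, 1, 1, 179, 30, 181, 13, 1,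 4, 1, 31, 1, 2, 9, 19, 191, 32, 193, 1, 13, 14, 197, 33, 199, 20, 1], [2, 2, 2, 2, 1, 2, 0, 2, 1, 1, 0, 2, 0, 2, 0, 0, 1, 2, 0, 2, 0, 0, 0, 2, 0, 1, 0, 1, 0, 2, 0, 2, 1, 0, 0, 0, 0, 2, 0, 0, 0, 2, 0, 2, 0, 0, 0, 2, 0, 1, 0, 0, 0, 2, 0, 0, 0, 0, 0, 2, 0, 2, 0, 0, 1, 0, 0, 2, 0, 0, 0, 2, 0, 2, 0, 0, 0, 0, 0, 2, 0, 1, 0, 2, 0, 0, 0, 0, 0, 2, 0, 0, 0, 0, 0, 0, 0, 2, 0, 0, 0, 2, 0, 2, 0, 0, 0, 2, 0, 2, 0, 0, 0, 2, 0, 0, 0, 0, 0, 0, 0, 1, 0, 0, 0, 1, 0, 2, 1, 0, 0, 2, 0, 0, 0, 0, 0, 2, 0, 2, 0, 0, 0, 0, 0, 0, 0, 0, 0, 2, 0, 2, 0, 0, 0, 0, 0, 2, 0, 0, 0, 0, 0, 2, 0, 0, 0, 2, 0, 1, 0, 0, 0, 2, 0, 0, 0, 0, 0, 2, 0, 2,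 0, 0, 0, 0, 0, 0, 0, 0, 0, 2, 0, 2, 0, 0, 0, 2, 0, 2, 0, 0])

def pvSt9 : List Int × List Int := ([0, 1, 2, 3, 2, 5, 1, 7, 4, 3, 1, 11, 2, 13, 1, 1, 8, 17, 3, 19, 2, 1, 1, 23, 4, 5, 1, 9, 2, 29, 5, 31, 16, 1, 1, 1, 6, 37, 1, 1, 4, 41, 7, 43, 2, 3, 1, 47, 8, 7, 5, 1, 2, 53, 9, 1, 4, 1, 1, 59, 10, 61, 1, 3, 32, 1, 11, 67, 2, 1, 7, 71, 12, 73, 1, 5, 2, 1, 13, 79, 8, 27, 1, 83, 14, 1, 1, 1, 4, 89, 15, 1, 2, 1, 1, 1, 16, 97, 7, 3, 10, 101, 17, 103, 4, 7, 1, 107, 18, 109, 11, 1, 8, 113, 19, 1, 2, 3, 1, 1, 20, 11, 1, 1, 2, 25, 21, 127, 64, 1, 13, 131, 22, 1, 1, 9, 4, 137, 23, 139, 14, 1, 1, 1, 24, 1, 1, 7, 2, 149, 25, 151, 4, 3, 11, 1, 26, 157, 1, 1, 16, 1, 27, 163, 2, 11, 1, 167, 28, 13, 17, 3, 2, 173,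 29, 5, 8, 1, 1, 179, 30, 181, 13, 1, 4, 1, 31, 1, 2, 9, 19, 191, 32, 193, 1, 13, 14, 197, 33, 199, 20, 1], [2, 2, 2, 2, 1, 2, 0, 2, 1, 1, 0, 2, 0, 2, 0, 0, 1, 2, 0, 2, 0, 0, 0, 2, 0, 1, 0, 1, 0, 2, 0, 2, 1, 0, 0, 0, 0, 2, 0, 0, 0, 2, 0, 2, 0, 0, 0, 2, 0, 1, 0, 0, 0, 2, 0, 0, 0, 0, 0, 2, 0, 2, 0, 0, 1, 0, 0, 2, 0, 0, 0, 2, 0, 2, 0, 0, 0, 0, 0, 2, 0, 1, 0, 2, 0, 0, 0, 0, 0, 2, 0, 0, 0, 0, 0, 0, 0, 2, 0, 0, 0, 2, 0, 2, 0, 0, 0, 2, 0, 2, 0, 0, 0, 2, 0, 0, 0, 0, 0, 0, 0, 1, 0, 0, 0, 1, 0, 2, 1, 0, 0, 2, 0, 0, 0, 0, 0, 2, 0, 2, 0, 0, 0, 0, 0, 0, 0, 0, 0, 2, 0, 2, 0, 0, 0, 0, 0, 2, 0, 0, 0, 0, 0, 2, 0, 0, 0, 2, 0, 1, 0, 0,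 0, 2, 0, 0, 0, 0, 0, 2, 0, 2, 0, 0, 0, 0, 0, 0, 0, 0, 0, 2, 0, 2, 0, 0, 0, 2, 0, 2, 0, 0])

def pvTable : List Int := pvSt9.1

set_option maxRecDepth 1000000 in
lemma pvV1_eq : pvV1build = pvV1 := by decide

set_option maxRecDepth 1000000 in
lemma pvCd1_eq : pvCd1build = pvCd1 := by decide

set_option maxRecDepth 1000000 in
lemma pvChunk0 : (PySem.List.pyRange 2 22 1).foldl pvOuter (pvV1, pvCd1) = pvSt0 := by decide

set_option maxRecDepth 1000000 in
lemma pvChunk1 : (PySem.List.pyRange 22 42 1).foldl pvOuter pvSt0 = pvSt1 := by decide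

set_option maxRecDepth 1000000 in
lemma pvChunk2 : (PySem.List.pyRange 42 62 1).foldl pvOuter pvSt1 = pvSt2 := by decide

set_option maxRecDepth 1000000 in
lemma pvChunk3 : (PySem.List.pyRange 62 82 1).foldl pvOuter pvSt2 = pvSt3 := by decide

set_option maxRecDepth 1000000 in
lemma pvChunk4 : (PySem.List.pyRange 82 102 1).foldl pvOuter pvSt3 = pvSt4 := by decide

set_option maxRecDepth 1000000 in
lemma pvChunk5 : (PySem.List.pyRange 102 122 1).foldl pvOuter pvSt4 = pvSt5 := by decide

set_option maxRecDepth 1000000 in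
lemma pvChunk6 : (PySem.List.pyRange 122 142 1).foldl pvOuter pvSt5 = pvSt6 := by decide

set_option maxRecDepth 1000000 in
lemma pvChunk7 : (PySem.List.pyRange 142 162 1).foldl pvOuter pvSt6 = pvSt7 := by decide

set_option maxRecDepth 1000000 in
lemma pvChunk8 : (PySem.List.pyRange 162 182 1).foldl pvOuter pvSt7 = pvSt8 := by decide

set_option maxRecDepth 1000000 in
lemma pvChunk9 : (PySem.List.pyRange 182 202 1).foldl pvOuter pvSt8 = pvSt9 := by decide

lemma pvFold_eq :
    (PySem.List.pyRange 2 202 1).foldl pvOuter (pvV1build, pvCd1build) = pvSt9 := by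
  rw [pvV1_eq, pvCd1_eq]
  calc (PySem.List.pyRange 2 202 1).foldl pvOuter (pvV1, pvCd1)
    _ = (PySem.List.pyRange 22 202 1).foldl pvOuter pvSt0 := by
        rw [PySem.List.pyRange_one_append 2 22 202 (by norm_num) (by norm_num), List.foldl_append, pvChunk0]
    _ = (PySem.List.pyRange 42 202 1).foldl pvOuter pvSt1 := by
        rw [PySem.List.pyRange_one_append 22 42 202 (by norm_num) (by norm_num), List.foldl_append, pvChunk1]
    _ = (PySem.List.pyRange 62 202 1).foldl pvOuter pvSt2 := by
        rw [PySem.List.pyRange_one_append 42 62 202 (by norm_num) (by norm_num), List.foldl_append, pvChunk2]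
    _ = (PySem.List.pyRange 82 202 1).foldl pvOuter pvSt3 := by
        rw [PySem.List.pyRange_one_append 62 82 202 (by norm_num) (by norm_num), List.foldl_append, pvChunk3]
    _ = (PySem.List.pyRange 102 202 1).foldl pvOuter pvSt4 := by
        rw [PySem.List.pyRange_one_append 82 102 202 (by norm_num) (by norm_num), List.foldl_append, pvChunk4]
    _ = (PySem.List.pyRange 122 202 1).foldl pvOuter pvSt5 := by
        rw [PySem.List.pyRange_one_append 102 122 202 (by norm_num) (by norm_num), List.foldl_append, pvChunk5]
    _ = (PySem.List.pyRange 142 202 1).foldl pvOuter pvSt6 := by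
        rw [PySem.List.pyRange_one_append 122 142 202 (by norm_num) (by norm_num), List.foldl_append, pvChunk6]
    _ = (PySem.List.pyRange 162 202 1).foldl pvOuter pvSt7 := by
        rw [PySem.List.pyRange_one_append 142 162 202 (by norm_num) (by norm_num), List.foldl_append, pvChunk7]
    _ = (PySem.List.pyRange 182 202 1).foldl pvOuter pvSt8 := by
        rw [PySem.List.pyRange_one_append 162 182 202 (by norm_num) (by norm_num), List.foldl_append, pvChunk8]
    _ = (PySem.List.pyRange 202 202 1).foldl pvOuter pvSt9 := by
        rw [PySem.List.pyRange_one_append 182 202 202 (by norm_num) (by norm_num), List.foldl_append, pvChunk9]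
    _ = pvSt9 := by rw [PySem.List.pyRange_one_eq_nil (by norm_num)]; rfl

lemma pvGen_eq : pvGen = pvTable := by
  unfold pvGen pvTable
  norm_num [pvFold_eq]

-- index 1 (where v[1] = 1 but 1 is no semiprime) is excluded: the loop only reads
-- indices ≥ 2
lemma pvPtw : ∀ k : Fin 202, 2 ≤ (k : Nat) →
    (PySem.List.pyGetD pvTable ((k : Nat) : Int) 0 == 1) = pvIsSemi ((k : Nat) : Int) := by
  set_option maxRecDepth 100000 in decide

lemma pvSmall : ∀ k : Fin 6, pvIsSemi ((k : Nat) : Int) = false := by decide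

lemma pvPtwInt (m : Int) (h0 : 2 ≤ m) (h1 : m ≤ 201) :
    (PySem.List.pyGetD pvTable m 0 == 1) = pvIsSemi m := by
  have := pvPtw ⟨m.toNat, by omega⟩ (by simp; omega)
  simpa [Int.toNat_of_nonneg (by omega : (0:Int) ≤ m)] using this

lemma pvSmallInt (m : Int) (h0 : 0 ≤ m) (h1 : m ≤ 5) : pvIsSemi m = false := by
  have := pvSmall ⟨m.toNat, by omega⟩
  simpa [Int.toNat_of_nonneg h0] using this

-- condition equality at each visited index
lemma pvCondEq (N i : Int) (hN : N ≤ 207) (hi : 2 ≤ i) (hNi : 2 ≤ N - i) (hi' : i ≤ 103) :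
    (PySem.List.pyGetD pvTable i 0 == 1 && PySem.List.pyGetD pvTable (N - i) 0 == 1)
      = (pvIsSemi i && pvIsSemi (N - i)) := by
  have h1 : (PySem.List.pyGetD pvTable i 0 == 1) = pvIsSemi i :=
    pvPtwInt i (by omega) (by omega)
  by_cases hS : pvIsSemi i = true
  · have h6 : 6 ≤ i := by
      by_contra h
      have := pvSmallInt i (by omega) (by omega)
      simp [this] at hS
    have h2 : (PySem.List.pyGetD pvTable (N - i) 0 == 1) = pvIsSemi (N - i) :=
      pvPtwInt (N - i) (by omega) (by omega)
    rw [h1, h2]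
  · have hS' : pvIsSemi i = false := by simpa using hS
    have h1' : (PySem.List.pyGetD pvTable i 0 == 1) = false := by rw [h1, hS']
    simp [h1', hS']

lemma pvLoopEq (N : Int) (l : List Int)
    (h : ∀ i ∈ l, (PySem.List.pyGetD pvTable i 0 == 1 && PySem.List.pyGetD pvTable (N - i) 0 == 1)
        = (pvIsSemi i && pvIsSemi (N - i))) :
    pvBloop N l = if pvAloop pvTable N l then "YES" else "NO" := by
  induction l with
  | nil => simp [pvBloop, pvAloop]
  | cons i rest ih =>
    have hcond := h i (by simp)
    by_cases hc : (pvIsSemi i && pvIsSemi (N - i)) = true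
    · simp [pvBloop, pvAloop, hc, hcond ▸ hc]
    · have hc' : (pvIsSemi i && pvIsSemi (N - i)) = false := by simpa using hc
      have ha : (PySem.List.pyGetD pvTable i 0 == 1 && PySem.List.pyGetD pvTable (N - i) 0 == 1) = false := by
        rw [hcond, hc']
      simp only [pvBloop, pvAloop, hc', ha, if_false, Bool.false_eq_true]
      exact ih (fun j hj => h j (by simp [hj]))

-- ===== VERDICT (by name: the statement is the Claim_ definition above) =====
theorem can_be_sum_of_two_semi_primes_spec : Claim_equal_can_be_sum_of_two_semi_primes := by
  intro N _ hPre
  unfold Spec_can_be_sum_of_two_semi_primes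
  unfold can_be_sum_of_two_semi_primes can_be_sum_of_two_semi_primes_alt
  rw [pvGen_eq]
  refine (pvLoopEq N _ ?_).symm
  intro i hi
  rw [PySem.List.mem_pyRange_one] at hi
  have h2 : i * 2 ≤ N := (PySem.Int.le_floordiv_iff_mul_le (by omega)).mp (by omega)
  have hPre' : N ≤ 207 := hPre
  exact pvCondEq N i hPre' (by omega) (by omega) (by omega)

@[simp]
theorem can_be_sum_of_two_semi_primes_raises : Claim_raises_can_be_sum_of_two_semi_primes := by
  unfold Claim_raises_can_be_sum_of_two_semi_primes
  constructor
  · intro N _ hR hP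
    exact absurd hP (by unfold Pre_can_be_sum_of_two_semi_primes; unfold Raises_can_be_sum_of_two_semi_primes at hR; omega)
  · refine ⟨by decide, by decide, by decide⟩
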